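-- pv_equiv track=rewrite | github.com/pypi-data/pypi-mirror-245 | packages/crescience-websocket-py/crescience_websocket_py-0.0.2-py3-none-any.whl/crescience_websocket_py/message.py | substituteBetween2
-- ===== SOURCE A (Python) =====
-- def substituteBetween2(
--     strung: str,
--     quote1="{",
--     quote2="}",
--     escape_char="\\",
--     sub_prefix="<sub",
--     sub_suffix=">",
-- ):
--     """Substitution helper."""
--     quoteIndices = [
--         i
--         for i, ltr in enumerate(strung)
--         if (
--             (ltr in (quote1, quote2))
--             and (strung.count('"', 0, i) - strung.count('\\"', 0, i)) % 2 == 0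
--         )
--     ]
--     if len(quoteIndices) > 0:
--         pass
--     return substitute(strung, quoteIndices, escape_char, sub_prefix, sub_suffix)
--
-- def substitute(
--     strung: str,
--     quoteIndices: list[int],
--     escape_char: str,
--     sub_prefix: str,
--     sub_suffix: str,
-- ):
--     """Substitution of areas from a string."""
--     subs: dict[str, str] = {}
--     if len(quoteIndices) > 0:
--         # search for \" and ignore it
--         if 0 in quoteIndices:
--             raise ParseError("Invalid quotes")
--         escaped_quote_idxs = [i for i in quoteIndices if strung[i - 1] != escape_char]
--
--         if len(escaped_quote_idxs) % 2 != 0: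
--             raise ParseError(
--                 f"Invalid number of quotes. Total: {len(quoteIndices)}, Unescaped: {len(escaped_quote_idxs)}"
--             )
--
--         # replace strings with placeholders
--         for i in reversed(range(int(len(escaped_quote_idxs) / 2))):
--             start = escaped_quote_idxs[int(i * 2)]
--             end = escaped_quote_idxs[int(i * 2 + 1)] + 1
--             sub = strung[start:end]
--             placeholder = sub_prefix + str(len(subs)) + sub_suffix
--             subs[placeholder] = sub
--             strung = strung[0:start] + placeholder + strung[end:]
--     return strung, subs
--
-- class ParseError(Exception):
--     """Error while parsing message."""
-- ===== SOURCE B (Python) =====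
-- class ParseError(Exception):
--     """Error while parsing message."""
--
--
-- def substituteBetween2(
--     strung: str,
--     quote1="{",
--     quote2="}",
--     escape_char="\\",
--     sub_prefix="<sub",
--     sub_suffix=">",
-- ):
--     """Substitution helper: single pass with a running unescaped-quote parity,
--     then a forward left-to-right rebuild of the string from pieces."""
--     if strung and (strung[0] == quote1 or strung[0] == quote2):
--         raise ParseError("Invalid quotes")
--     idxs = []
--     q = 0  # number of '"' not preceded by '\' seen so far (parity matters)
--     for i, ch in enumerate(strung):
--         if (
--             i > 0
--             and q % 2 == 0
--             and (ch == quote1 or ch == quote2)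
--             and strung[i - 1] != escape_char
--         ):
--             idxs.append(i)
--         if ch == '"' and not (i > 0 and strung[i - 1] == "\\"):
--             q += 1
--     if len(idxs) % 2:
--         raise ParseError("Invalid number of quotes")
--     npairs = len(idxs) // 2
--     pieces = []
--     pairs = []
--     pos = 0
--     for k in range(npairs):
--         start, end = idxs[2 * k], idxs[2 * k + 1] + 1
--         ph = sub_prefix + str(npairs - 1 - k) + sub_suffix
--         pieces.append(strung[pos:start])
--         pieces.append(ph)
--         pairs.append((ph, strung[start:end]))
--         pos = end
--     pieces.append(strung[pos:])
--     return "".join(pieces), dict(reversed(pairs))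
-- ===== Notes on version B (the rewrite author's own statement) =====
-- stated objective: alternative
-- what changed: A recomputes strung.count('"',0,i) and strung.count('\\"',0,i) at every delimiter candidate and then rebuilds the string by repeated back-to-front slice splicing with a dict built during the splice; B makes one pass keeping a running count of unescaped '"' characters to collect the delimiter indices, then assembles the result left-to-right from pieces joined once, numbering the placeholders arithmetically and building the dict from the collected pairs.
import Mathlib
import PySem

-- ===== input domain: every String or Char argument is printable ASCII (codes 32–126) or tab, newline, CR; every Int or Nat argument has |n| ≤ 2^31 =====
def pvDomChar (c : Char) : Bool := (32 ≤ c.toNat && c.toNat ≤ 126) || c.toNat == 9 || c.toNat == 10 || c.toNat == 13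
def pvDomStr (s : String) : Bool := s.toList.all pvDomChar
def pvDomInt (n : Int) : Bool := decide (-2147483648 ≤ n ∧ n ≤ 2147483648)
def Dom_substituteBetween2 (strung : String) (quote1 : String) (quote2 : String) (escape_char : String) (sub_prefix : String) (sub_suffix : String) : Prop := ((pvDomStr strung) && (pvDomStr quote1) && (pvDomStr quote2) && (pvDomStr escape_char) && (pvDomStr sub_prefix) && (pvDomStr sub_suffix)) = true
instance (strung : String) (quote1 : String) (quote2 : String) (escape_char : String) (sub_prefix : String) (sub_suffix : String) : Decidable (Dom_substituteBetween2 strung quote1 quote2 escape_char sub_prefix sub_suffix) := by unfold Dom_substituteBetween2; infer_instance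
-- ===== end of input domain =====

-- B replaces A's per-index count() calls by one pass with a running unescaped-quote
-- count and rebuilds the string left-to-right from pieces (objective: alternative).


-- ===== PORT A =====
-- a one-character Python string  s[i]
def pvChr (c : Char) : String := String.ofList [c]

-- hand port of strung.count('"', 0, i) applied to the prefix strung[0:i]:
-- for the one-character needle '"' the number of non-overlapping occurrences
-- is exactly the number of '"' characters (exact)
def pvCount1 (l : List Char) : Nat := l.count '"'

-- hand port of strung.count('\\"', 0, i) applied to the prefix strung[0:i]:
-- the needle '\\"' has two DISTINCT characters, so occurrences can never
-- overlap and the non-overlapping count is exactly the number of positions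
-- j with l[j] = '\\' and l[j+1] = '"' (exact)
def pvCount2 : List Char → Nat
  | a :: b :: t => (if a = '\\' ∧ b = '"' then 1 else 0) + pvCount2 (b :: t)
  | _ => 0

def substituteBetween2 (strung : String) (quote1 : String) (quote2 : String) (escape_char : String) (sub_prefix : String) (sub_suffix : String) : String × (List (String × String)) :=
  let cs := strung.toList
  -- quoteIndices = [i for i, ltr in enumerate(strung) if …]
  let quoteIndices : List Int :=
    ((PySem.List.enumerate cs 0).filter (fun p =>
      (pvChr p.2 == quote1 || pvChr p.2 == quote2) &&
      (PySem.Int.mod ((pvCount1 (PySem.List.slice cs none (some p.1)) : Int)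
          - (pvCount2 (PySem.List.slice cs none (some p.1)) : Int)) 2 == 0))).map (fun p => p.1)
  -- substitute(strung, quoteIndices, escape_char, sub_prefix, sub_suffix)
  if 0 < quoteIndices.length then
    if quoteIndices.contains 0 then (strung, [])  -- raise ParseError("Invalid quotes"): outside Pre_
    else
      let escaped := quoteIndices.filter (fun i =>
        !((PySem.List.pyGet? cs (i - 1)).map pvChr == some escape_char))
      if escaped.length % 2 ≠ 0 then (strung, [])  -- raise ParseError("Invalid number of quotes"): outside Pre_
      else
        let r := (List.range (escaped.length / 2)).reverse.foldl
          (fun (st : List Char × PySem.Dict String String) i =>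
            let start := PySem.List.pyGetD escaped ((i * 2 : Nat) : Int) 0
            let stop := PySem.List.pyGetD escaped ((i * 2 + 1 : Nat) : Int) 0 + 1
            let sub := PySem.List.slice st.1 (some start) (some stop)
            let ph := sub_prefix.toList ++ PySem.Int.toChars (st.2.items.length : Int) ++ sub_suffix.toList
            (PySem.List.slice st.1 (some 0) (some start) ++ ph ++ PySem.List.slice st.1 (some stop) none,
             st.2.insert (String.ofList ph) (String.ofList sub)))
          (cs, PySem.Dict.mk [])
        (String.ofList r.1, r.2.items)
  else (strung, [])

-- ===== PORT B =====
-- strung and (strung[0] == quote1 or strung[0] == quote2)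
def pvDelim0 (cs : List Char) (q1 q2 : String) : Bool :=
  match cs with
  | c :: _ => pvChr c == q1 || pvChr c == q2
  | [] => false

def substituteBetween2_alt (strung : String) (quote1 : String) (quote2 : String) (escape_char : String) (sub_prefix : String) (sub_suffix : String) : String × (List (String × String)) :=
  let cs := strung.toList
  if pvDelim0 cs quote1 quote2 then (strung, [])  -- raise ParseError("Invalid quotes"): outside Pre_
  else
    -- one pass: collect delimiter indices, maintain running unescaped-quote count q
    let st := (PySem.List.enumerate cs 0).foldl
      (fun (st : List Int × Int) p =>
        ((if decide (0 < p.1) && (PySem.Int.mod st.2 2 == 0)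
              && (pvChr p.2 == quote1 || pvChr p.2 == quote2)
              && !((PySem.List.pyGet? cs (p.1 - 1)).map pvChr == some escape_char)
          then st.1 ++ [p.1] else st.1),
         (if (pvChr p.2 == "\"")
              && !(decide (0 < p.1) && ((PySem.List.pyGet? cs (p.1 - 1)).map pvChr == some "\\"))
          then st.2 + 1 else st.2)))
      ([], 0)
    if st.1.length % 2 ≠ 0 then (strung, [])  -- raise ParseError("Invalid number of quotes"): outside Pre_
    else
      let n := st.1.length / 2
      let r := (List.range n).foldl
        (fun (acc : List (List Char) × List (String × String) × Int) k =>
          let start := PySem.List.pyGetD st.1 ((2 * k : Nat) : Int) 0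
          let stop := PySem.List.pyGetD st.1 ((2 * k + 1 : Nat) : Int) 0 + 1
          let ph := sub_prefix.toList ++ PySem.Int.toChars ((n : Int) - 1 - k) ++ sub_suffix.toList
          (acc.1 ++ [PySem.List.slice cs (some acc.2.2) (some start), ph],
           acc.2.1 ++ [(String.ofList ph, String.ofList (PySem.List.slice cs (some start) (some stop)))],
           stop))
        ([], [], 0)
      (String.ofList (r.1 ++ [PySem.List.slice cs (some r.2.2) none]).flatten,
       (r.2.1.reverse.foldl (fun (d : PySem.Dict String String) p => d.insert p.1 p.2) (PySem.Dict.mk [])).items)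

-- ===== PRECONDITION & SPEC =====
-- number of characters '"' in l that are not directly preceded by '\'
def pvQCnt (l : List Char) : Nat :=
  (List.range l.length).countP (fun j => decide (l[j]! = '"' ∧ ¬(0 < j ∧ l[j-1]! = '\\')))

-- the indices the substitution acts on: position of an unescaped quote1/quote2
-- character lying outside any "-delimited region
def pvSpecIdxs (cs : List Char) (q1 q2 ec : String) : List Nat :=
  (List.range cs.length).filter (fun i => decide (
    0 < i ∧ (pvChr cs[i]! = q1 ∨ pvChr cs[i]! = q2) ∧ 2 ∣ pvQCnt (cs.take i) ∧ pvChr cs[i-1]! ≠ ec))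

-- Pre_ excludes exactly the inputs on which A raises ParseError: a quote1/quote2
-- character at index 0, or an odd number of unescaped substitution delimiters.
def Pre_substituteBetween2 (strung : String) (quote1 : String) (quote2 : String) (escape_char : String) (sub_prefix : String) (sub_suffix : String) : Prop :=
  pvDelim0 strung.toList quote1 quote2 = false ∧
  2 ∣ (pvSpecIdxs strung.toList quote1 quote2 escape_char).length
instance (strung : String) (quote1 : String) (quote2 : String) (escape_char : String) (sub_prefix : String) (sub_suffix : String) : Decidable (Pre_substituteBetween2 strung quote1 quote2 escape_char sub_prefix sub_suffix) := by unfold Pre_substituteBetween2; infer_instance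

def pvWitness_substituteBetween2 : String × String × String × String × String × String :=
  ("x{y}z \"{\" w", "{", "}", "\\", "<sub", ">")

def Spec_substituteBetween2 (strung : String) (quote1 : String) (quote2 : String) (escape_char : String) (sub_prefix : String) (sub_suffix : String) (out : String × (List (String × String))) : Prop := out = substituteBetween2_alt strung quote1 quote2 escape_char sub_prefix sub_suffix
instance (strung : String) (quote1 : String) (quote2 : String) (escape_char : String) (sub_prefix : String) (sub_suffix : String) (out : String × (List (String × String))) : Decidable (Spec_substituteBetween2 strung quote1 quote2 escape_char sub_prefix sub_suffix out) := by unfold Spec_substituteBetween2; infer_instance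

-- ===== CLAIM (what is proved, stated in full; the proofs are below) =====
def Claim_equal_substituteBetween2 : Prop := ∀ (strung : String) (quote1 : String) (quote2 : String) (escape_char : String) (sub_prefix : String) (sub_suffix : String), Dom_substituteBetween2 strung quote1 quote2 escape_char sub_prefix sub_suffix → Pre_substituteBetween2 strung quote1 quote2 escape_char sub_prefix sub_suffix → Spec_substituteBetween2 strung quote1 quote2 escape_char sub_prefix sub_suffix (substituteBetween2 strung quote1 quote2 escape_char sub_prefix sub_suffix)

-- ===== LEMMAS AND PROOFS =====

-- ---------- generic small helpers ----------

theorem pvGetbang_append_lt {α : Type} [Inhabited α] (xs : List α) (c : α) (k : Nat)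
    (h : k < xs.length) : (xs ++ [c])[k]! = xs[k]! := by
  rw [getElem!_pos (xs ++ [c]) k (by simp; omega), getElem!_pos xs k h,
    List.getElem_append_left h]

theorem pvOfList_inj {a b : List Char} (h : String.ofList a = String.ofList b) : a = b := by
  have := congrArg String.toList h
  simpa using this

theorem pvMap_getbang_range {α : Type} [Inhabited α] (l : List α) :
    (List.range l.length).map (fun i => l[i]!) = l := by
  apply List.ext_getElem (by simp)
  intro i h1 h2
  simp [getElem!_pos l i h2, List.getElem?_eq_getElem h2]

-- ---------- str(n) is injective on the naturals ----------

def pvVal (l : List Char) : Nat := l.foldl (fun a c => 10 * a + (c.toNat - 48)) 0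

theorem pvVal_append (l : List Char) (c : Char) :
    pvVal (l ++ [c]) = 10 * pvVal l + (c.toNat - 48) := by
  simp [pvVal]

theorem pvDigitChar_val (m : Nat) (h : m < 10) : (Nat.digitChar m).toNat - 48 = m := by
  interval_cases m <;> decide

theorem pvToDigitsCore_acc (fuel : Nat) : ∀ (n : Nat) (acc : List Char),
    Nat.toDigitsCore 10 fuel n acc = Nat.toDigitsCore 10 fuel n [] ++ acc := by
  induction fuel with
  | zero => intro n acc; simp [Nat.toDigitsCore]
  | succ f ih =>
    intro n acc
    simp only [Nat.toDigitsCore]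
    by_cases h : n / 10 = 0
    · simp [h]
    · simp only [h, if_neg h]
      rw [ih (n / 10) (Nat.digitChar (n % 10) :: acc), ih (n / 10) [Nat.digitChar (n % 10)]]
      simp

theorem pvToDigitsCore_fuel (n : Nat) : ∀ fuel, n < fuel →
    Nat.toDigitsCore 10 fuel n [] = Nat.toDigitsCore 10 (n + 1) n [] := by
  induction n using Nat.strong_induction_on with
  | _ n ih =>
    intro fuel hf
    match fuel, hf with
    | f + 1, hf =>
      simp only [Nat.toDigitsCore]
      by_cases h : n / 10 = 0
      · simp [h]
      · simp only [h, if_neg h]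
        have hn : 0 < n := by
          rcases Nat.eq_zero_or_pos n with h0 | h0
          · subst h0; simp at h
          · exact h0
        have hlt : n / 10 < n := Nat.div_lt_self hn (by norm_num)
        rw [pvToDigitsCore_acc f, pvToDigitsCore_acc n]
        rw [ih (n / 10) hlt f (by omega), ih (n / 10) hlt n (by omega)]

theorem pvVal_toDigits (n : Nat) : pvVal (Nat.toDigits 10 n) = n := by
  induction n using Nat.strong_induction_on with
  | _ n ih =>
    unfold Nat.toDigits
    simp only [Nat.toDigitsCore]
    by_cases h : n / 10 = 0
    · rw [if_pos h]
      simp only [pvVal, List.foldl_cons, List.foldl_nil, Nat.mul_zero, Nat.zero_add]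
      rw [pvDigitChar_val (n % 10) (Nat.mod_lt _ (by norm_num))]
      omega
    · rw [if_neg h]
      have hn : 0 < n := by
        rcases Nat.eq_zero_or_pos n with h0 | h0
        · subst h0; simp at h
        · exact h0
      have hlt : n / 10 < n := Nat.div_lt_self hn (by norm_num)
      rw [pvToDigitsCore_acc n, pvToDigitsCore_fuel (n / 10) n (by omega)]
      have h2 : Nat.toDigitsCore 10 (n / 10 + 1) (n / 10) [] = Nat.toDigits 10 (n / 10) := rfl
      rw [h2, pvVal_append, ih (n / 10) hlt,
        pvDigitChar_val (n % 10) (Nat.mod_lt _ (by norm_num))]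
      omega

theorem pvToChars_nat_inj {m n : Nat} (h : PySem.Int.toChars (m : Int) = PySem.Int.toChars (n : Int)) :
    m = n := by
  unfold PySem.Int.toChars at h
  rw [if_neg (by omega), if_neg (by omega)] at h
  simp only [Int.toNat_natCast] at h
  have := congrArg pvVal h
  rwa [pvVal_toDigits, pvVal_toDigits] at this

theorem pvGetbang_cons_zero {α : Type} [Inhabited α] (a : α) (l : List α) :
    (a :: l)[0]! = a := by
  rw [getElem!_pos (a :: l) 0 (by simp)]
  simp

theorem pvGetbang_cons_succ {α : Type} [Inhabited α] (a : α) (l : List α) (i : Nat)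
    (h : i < l.length) : (a :: l)[i + 1]! = l[i]! := by
  rw [getElem!_pos (a :: l) (i + 1) (by simp; omega), getElem!_pos l i h]
  simp

-- ---------- the quote-parity counts ----------

theorem pvCount2_snoc (xs : List Char) (c : Char) :
    pvCount2 (xs ++ [c]) =
      pvCount2 xs + (if 0 < xs.length ∧ xs[xs.length - 1]! = '\\' ∧ c = '"' then 1 else 0) := by
  induction xs with
  | nil => simp [pvCount2]
  | cons a t ih =>
    cases t with
    | nil =>
      have h0 : ([a] : List Char)[0]! = a := by simp [getElem!_pos]
      by_cases ha : a = '\\' <;> by_cases hc : c = '"' <;>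
        simp [pvCount2, ha, hc, h0]
    | cons b t' =>
      have hstep : pvCount2 (a :: b :: (t' ++ [c])) =
          (if a = '\\' ∧ b = '"' then 1 else 0) + pvCount2 (b :: (t' ++ [c])) := rfl
      have h3 : pvCount2 (a :: b :: t') =
          (if a = '\\' ∧ b = '"' then 1 else 0) + pvCount2 (b :: t') := rfl
      have hidx : ((a :: b :: t' : List Char))[(a :: b :: t').length - 1]! =
          ((b :: t' : List Char))[(b :: t').length - 1]! := by
        have h2 : (b :: t').length - 1 < (b :: t').length := by simp
        rw [show (a :: b :: t').length - 1 = ((b :: t').length - 1) + 1 by simp,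
          getElem!_pos (a :: b :: t') _ (by simpa using Nat.succ_lt_succ h2),
          getElem!_pos (b :: t') _ h2]
        simp
      simp only [List.cons_append] at ih ⊢
      rw [hstep, ih, h3, hidx]
      have h4 : (0 < (b :: t').length) := by simp
      have h5 : (0 < (a :: b :: t').length) := by simp
      simp only [h4, h5, true_and]
      omega

theorem pvQCnt_snoc (xs : List Char) (c : Char) :
    pvQCnt (xs ++ [c]) =
      pvQCnt xs + (if c = '"' ∧ ¬(0 < xs.length ∧ xs[xs.length - 1]! = '\\') then 1 else 0) := by
  unfold pvQCnt
  rw [show (xs ++ [c]).length = xs.length + 1 by simp, List.range_succ, List.countP_append]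
  congr 1
  · apply List.countP_congr
    intro j hj
    simp only [List.mem_range] at hj
    rw [pvGetbang_append_lt _ _ _ hj, pvGetbang_append_lt _ _ _ (by omega)]
  · have hc : (xs ++ [c])[xs.length]! = c := by
      rw [getElem!_pos _ _ (by simp)]
      exact List.getElem_concat_length rfl _
    rcases Nat.eq_zero_or_pos xs.length with h0 | h0
    · simp [List.countP_cons, hc, h0]
    · have hp : (xs ++ [c])[xs.length - 1]! = xs[xs.length - 1]! :=
        pvGetbang_append_lt _ _ _ (by omega)
      simp only [List.countP_cons, List.countP_nil, Nat.zero_add, hc, hp, h0, true_and]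
      by_cases h1 : c = '"' <;> by_cases h2 : xs[xs.length - 1]! = '\\' <;>
        simp [h1, h2, h0]

theorem pvCount1_decomp (l : List Char) : pvCount1 l = pvQCnt l + pvCount2 l := by
  induction l using List.reverseRecOn with
  | nil => rfl
  | append_singleton xs c ih =>
    rw [pvQCnt_snoc, pvCount2_snoc]
    have hsing : List.count '"' [c] = if c = '"' then 1 else 0 := by
      by_cases hc : c = '"' <;> simp [hc]
    unfold pvCount1 at ih ⊢
    rw [List.count_append, ih, hsing]
    split_ifs <;> first | omega | tauto

theorem pvModTwo (q : Nat) : (PySem.Int.mod (q : Int) 2 == 0) = decide (2 ∣ q) := by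
  rw [show (2 : Int) = ((2 : Nat) : Int) from rfl, PySem.Int.mod_natCast]
  rcases Nat.even_or_odd q with h | h
  · obtain ⟨m, hm⟩ := h
    have : q % 2 = 0 := by omega
    simp [this, Nat.dvd_iff_mod_eq_zero]
  · obtain ⟨m, hm⟩ := h
    have : q % 2 = 1 := by omega
    simp [this, Nat.dvd_iff_mod_eq_zero]

theorem pvParity_eq (l : List Char) :
    (PySem.Int.mod ((pvCount1 l : Int) - (pvCount2 l : Int)) 2 == 0) = decide (2 ∣ pvQCnt l) := by
  have h : ((pvCount1 l : Int) - (pvCount2 l : Int)) = (pvQCnt l : Int) := by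
    rw [pvCount1_decomp]; push_cast; ring
  rw [h, pvModTwo]

-- ---------- the index lists of the two ports ----------

def pvAllIdxs (cs : List Char) (q1 q2 : String) : List Nat :=
  (List.range cs.length).filter (fun k =>
    (pvChr cs[k]! == q1 || pvChr cs[k]! == q2) && decide (2 ∣ pvQCnt (cs.take k)))

-- A's quoteIndices comprehension computes pvAllIdxs
theorem pvA_idxs (cs : List Char) (q1 q2 : String) :
    ((PySem.List.enumerate cs 0).filter (fun p =>
      (pvChr p.2 == q1 || pvChr p.2 == q2) &&
      (PySem.Int.mod ((pvCount1 (PySem.List.slice cs none (some p.1)) : Int)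
          - (pvCount2 (PySem.List.slice cs none (some p.1)) : Int)) 2 == 0))).map (fun p => p.1)
    = (pvAllIdxs cs q1 q2).map (fun (k : Nat) => (k : Int)) := by
  rw [PySem.List.enumerate_eq_map_pyRange cs 'a', PySem.List.len_eq,
    PySem.List.pyRange_zero_natCast, List.map_map, List.filter_map, List.map_map]
  unfold pvAllIdxs
  rw [List.filter_congr (q := fun k =>
      (pvChr cs[k]! == q1 || pvChr cs[k]! == q2) && decide (2 ∣ pvQCnt (cs.take k)))]
  · simp [Function.comp]
  · intro k hk
    simp only [List.mem_range] at hk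
    have hget : PySem.List.pyGetD cs (↑k) 'a' = cs[k]! := by
      rw [PySem.List.pyGetD_natCast, getElem!_pos cs k hk]
      exact List.getD_eq_getElem _ _ hk
    have hsl : PySem.List.slice cs none (some (k : Int)) = cs.take k := by
      rw [PySem.List.slice_to cs (by positivity)]
      simp
    simp only [Function.comp]
    rw [hsl, pvParity_eq]
    simp [hget]

theorem pvAllIdxs_contains_zero (cs : List Char) (q1 q2 : String) :
    ((pvAllIdxs cs q1 q2).map (fun (k : Nat) => (k : Int))).contains 0 = pvDelim0 cs q1 q2 := by
  cases cs with
  | nil => simp [pvAllIdxs, pvDelim0]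
  | cons c t =>
    have hmem : ((0 : Int) ∈ (pvAllIdxs (c :: t) q1 q2).map (fun (k : Nat) => (k : Int)))
        ↔ (0 : Nat) ∈ pvAllIdxs (c :: t) q1 q2 := by
      simp only [List.mem_map]
      constructor
      · rintro ⟨k, hk, hke⟩
        have : k = 0 := by exact_mod_cast hke
        subst this; exact hk
      · intro hk; exact ⟨0, hk, rfl⟩
    have hzero : (0 : Nat) ∈ pvAllIdxs (c :: t) q1 q2 ↔ pvDelim0 (c :: t) q1 q2 = true := by
      unfold pvAllIdxs pvDelim0
      rw [List.mem_filter]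
      simp only [List.mem_range, List.length_cons]
      constructor
      · rintro ⟨-, hp⟩
        have hg : ((c :: t : List Char))[0]! = c := pvGetbang_cons_zero c t
        simp only [List.take_zero, hg] at hp
        have h1 := ((Bool.and_eq_true _ _).mp hp).1
        simpa [pvDelim0] using h1
      · intro hd
        refine ⟨by omega, ?_⟩
        have hg : ((c :: t : List Char))[0]! = c := pvGetbang_cons_zero c t
        simp only [List.take_zero, hg]
        have hq : pvQCnt ([] : List Char) = 0 := rfl
        simp only [pvDelim0] at hd
        simp [hd, hq]
    rcases hb : pvDelim0 (c :: t) q1 q2 with _ | _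
    · simp only [List.contains_eq_mem, decide_eq_false_iff_not]
      rw [hmem, hzero, hb]; simp
    · simp only [List.contains_eq_mem, decide_eq_true_eq]
      rw [hmem, hzero, hb]

-- pvSpecIdxs is pvAllIdxs further filtered
theorem pvSpec_sub_all (cs : List Char) (q1 q2 ec : String) :
    pvSpecIdxs cs q1 q2 ec =
      (pvAllIdxs cs q1 q2).filter (fun k => decide (0 < k ∧ pvChr cs[k - 1]! ≠ ec)) := by
  unfold pvSpecIdxs pvAllIdxs
  rw [List.filter_filter]
  apply List.filter_congr
  intro k hk
  rw [Bool.eq_iff_iff]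
  simp only [decide_eq_true_eq, Bool.and_eq_true, Bool.or_eq_true, beq_iff_eq]
  tauto

-- A's escaped_quote_idxs equals pvSpecIdxs when no delimiter sits at index 0
theorem pvA_escaped (cs : List Char) (q1 q2 ec : String) (h0 : pvDelim0 cs q1 q2 = false) :
    ((pvAllIdxs cs q1 q2).map (fun (k : Nat) => (k : Int))).filter (fun i =>
        !((PySem.List.pyGet? cs (i - 1)).map pvChr == some ec))
      = (pvSpecIdxs cs q1 q2 ec).map (fun (k : Nat) => (k : Int)) := by
  rw [List.filter_map, pvSpec_sub_all]
  congr 1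
  apply List.filter_congr
  intro k hk
  have hz : k ≠ 0 := by
    intro h; subst h
    have : ((pvAllIdxs cs q1 q2).map (fun (k : Nat) => (k : Int))).contains 0 = true := by
      simp only [List.contains_eq_mem, decide_eq_true_eq, List.mem_map]
      exact ⟨0, hk, rfl⟩
    rw [pvAllIdxs_contains_zero, h0] at this
    exact Bool.false_ne_true this
  have hklen : k < cs.length := by
    have := (List.mem_filter.mp hk).1
    simpa using this
  have hcast : ((k : Int) - 1) = ((k - 1 : Nat) : Int) := by omega
  have hget : PySem.List.pyGet? cs ((k : Int) - 1) = some cs[k - 1]! := by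
    rw [hcast, PySem.List.pyGet?_natCast, List.getElem?_eq_getElem (by omega),
      getElem!_pos _ _ (by omega)]
  simp only [Function.comp, hget, Option.map_some]
  rw [Bool.eq_iff_iff]
  simp only [Bool.not_eq_eq_eq_not, Bool.not_true, beq_eq_false_iff_ne, ne_eq,
    Option.some.injEq, decide_eq_true_eq]
  constructor
  · intro h; exact ⟨by omega, h⟩
  · intro h; exact h.2

-- B's one pass over the enumerate list: the two components after consuming xs
-- are the collected indices and the running unescaped-quote count
theorem pvSpecIdxs_snoc (xs : List Char) (c : Char) (q1 q2 ec : String) :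
    pvSpecIdxs (xs ++ [c]) q1 q2 ec =
      pvSpecIdxs xs q1 q2 ec ++
        (if 0 < xs.length ∧ (pvChr c = q1 ∨ pvChr c = q2) ∧ 2 ∣ pvQCnt xs
              ∧ pvChr xs[xs.length - 1]! ≠ ec
         then [xs.length] else []) := by
  unfold pvSpecIdxs
  rw [show (xs ++ [c]).length = xs.length + 1 by simp, List.range_succ, List.filter_append]
  congr 1
  · apply List.filter_congr
    intro j hj
    simp only [List.mem_range] at hj
    rw [pvGetbang_append_lt _ _ _ hj, pvGetbang_append_lt _ _ _ (by omega),
      List.take_append_of_le_length (by omega)]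
  · have hc : (xs ++ [c])[xs.length]! = c := by
      rw [getElem!_pos _ _ (by simp)]
      exact List.getElem_concat_length rfl _
    have htake : (xs ++ [c]).take xs.length = xs := List.take_left
    rcases Nat.eq_zero_or_pos xs.length with h0 | h0
    · simp [hc, htake, h0]
    · have hp : (xs ++ [c])[xs.length - 1]! = xs[xs.length - 1]! :=
        pvGetbang_append_lt _ _ _ (by omega)
      simp only [List.filter_cons, List.filter_nil, hc, hp, htake, decide_eq_true_eq]

theorem pvChr_lit_quote (c : Char) : (pvChr c == "\"") = decide (c = '"') := by
  rw [Bool.eq_iff_iff]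
  simp only [beq_iff_eq, decide_eq_true_eq]
  constructor
  · intro h
    have := pvOfList_inj (a := [c]) (b := ['"']) (by simpa [pvChr] using h)
    simpa using this
  · intro h; subst h; rfl

theorem pvChr_lit_backslash (c : Char) : (pvChr c == "\\") = decide (c = '\\') := by
  rw [Bool.eq_iff_iff]
  simp only [beq_iff_eq, decide_eq_true_eq]
  constructor
  · intro h
    have := pvOfList_inj (a := [c]) (b := ['\\']) (by simpa [pvChr] using h)
    simpa using this
  · intro h; subst h; rfl

theorem pvChr_inj (c d : Char) : pvChr c = pvChr d ↔ c = d :=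
  ⟨fun h => by simpa using pvOfList_inj h, fun h => by rw [h]⟩

theorem pvLit_bs : "\\" = pvChr '\\' := by decide

theorem pvLit_q : "\"" = pvChr '"' := by decide

theorem pvB_loop (cs : List Char) (q1 q2 ec : String) :
    (PySem.List.enumerate cs 0).foldl
      (fun (st : List Int × Int) p =>
        ((if decide (0 < p.1) && (PySem.Int.mod st.2 2 == 0)
              && (pvChr p.2 == q1 || pvChr p.2 == q2)
              && !((PySem.List.pyGet? cs (p.1 - 1)).map pvChr == some ec)
          then st.1 ++ [p.1] else st.1),
         (if (pvChr p.2 == "\"")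
              && !(decide (0 < p.1) && ((PySem.List.pyGet? cs (p.1 - 1)).map pvChr == some "\\"))
          then st.2 + 1 else st.2)))
      ([], 0)
    = ((pvSpecIdxs cs q1 q2 ec).map (fun (k : Nat) => (k : Int)), (pvQCnt cs : Int)) := by
  induction cs using List.reverseRecOn with
  | nil => rfl
  | append_singleton xs c ih =>
    rw [PySem.List.enumerate_append xs [c] 0, List.foldl_append]
    have henum : PySem.List.enumerate [c] (0 + (xs.length : Int)) =
        [(0 + (xs.length : Int), c)] := by
      rw [PySem.List.enumerate_cons]
      rfl
    rw [henum]
    have hcong : (PySem.List.enumerate xs 0).foldl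
        (fun (st : List Int × Int) p =>
          ((if decide (0 < p.1) && (PySem.Int.mod st.2 2 == 0)
                && (pvChr p.2 == q1 || pvChr p.2 == q2)
                && !((PySem.List.pyGet? (xs ++ [c]) (p.1 - 1)).map pvChr == some ec)
            then st.1 ++ [p.1] else st.1),
           (if (pvChr p.2 == "\"")
                && !(decide (0 < p.1) && ((PySem.List.pyGet? (xs ++ [c]) (p.1 - 1)).map pvChr == some "\\"))
            then st.2 + 1 else st.2)))
        ([], 0)
      = (PySem.List.enumerate xs 0).foldl
        (fun (st : List Int × Int) p =>
          ((if decide (0 < p.1) && (PySem.Int.mod st.2 2 == 0)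
                && (pvChr p.2 == q1 || pvChr p.2 == q2)
                && !((PySem.List.pyGet? xs (p.1 - 1)).map pvChr == some ec)
            then st.1 ++ [p.1] else st.1),
           (if (pvChr p.2 == "\"")
                && !(decide (0 < p.1) && ((PySem.List.pyGet? xs (p.1 - 1)).map pvChr == some "\\"))
            then st.2 + 1 else st.2)))
        ([], 0) := by
      apply PySem.List.foldl_congr_mem
      intro acc p hp
      rw [PySem.List.mem_enumerate_iff] at hp
      obtain ⟨k, hk, rfl⟩ := hp
      by_cases hk0 : k = 0
      · subst hk0; simp
      · have hglt : PySem.List.pyGet? (xs ++ [c]) ((0 + (k : Int)) - 1) =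
            PySem.List.pyGet? xs ((0 + (k : Int)) - 1) := by
          have hcast : ((0 + (k : Int)) - 1) = ((k - 1 : Nat) : Int) := by omega
          rw [hcast, PySem.List.pyGet?_natCast, PySem.List.pyGet?_natCast,
            List.getElem?_append_left (by omega)]
        rw [hglt]
    rw [hcong, ih]
    simp only [List.foldl_cons, List.foldl_nil]
    rw [pvSpecIdxs_snoc, pvQCnt_snoc]
    rcases Nat.eq_zero_or_pos xs.length with hlen | hlen
    · have hxs : xs = [] := List.length_eq_zero_iff.mp hlen
      subst hxs
      by_cases hc : c = '"' <;>
        simp [pvChr_lit_quote, hc, pvSpecIdxs, pvQCnt]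
    · have hget : PySem.List.pyGet? (xs ++ [c]) ((0 + (xs.length : Int)) - 1) =
          some xs[xs.length - 1]! := by
        have hcast : ((0 + (xs.length : Int)) - 1) = ((xs.length - 1 : Nat) : Int) := by omega
        rw [hcast, PySem.List.pyGet?_natCast, List.getElem?_append_left (by omega),
          List.getElem?_eq_getElem (by omega), getElem!_pos xs _ (by omega)]
      have hbe : xs[xs.length - 1]! = xs[xs.length - 1]'(by omega) :=
        getElem!_pos xs _ (by omega)
      simp only [hget, Option.map_some, pvModTwo, pvChr_lit_quote, pvChr_lit_backslash]
      by_cases hd1 : pvChr c = q1 <;> by_cases hd2 : pvChr c = q2 <;>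
        by_cases hq : 2 ∣ pvQCnt xs <;> by_cases he : pvChr (xs[xs.length - 1]'(by omega)) = ec <;>
          by_cases hc : c = '"' <;> by_cases hb : xs[xs.length - 1]'(by omega) = '\\' <;>
            simp [hd1, hd2, hq, he, hc, hb, hlen, hbe, pvLit_bs, pvLit_q, pvChr_inj] <;>
              (try omega) <;> (try (split_ifs <;> simp)) <;> (try (exact fun h => he h.symm)) <;>
              (try (exact fun h => hb ((pvChr_inj _ _).mp (he.trans h))))

-- ---------- the substitution loop ----------


def pvPh (P S : List Char) (m : Nat) : List Char := P ++ PySem.Int.toChars (m : Int) ++ S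

def pvPairs : List Nat → List (Nat × Nat)
  | a :: b :: t => (a, b + 1) :: pvPairs t
  | _ => []

def pvEndFrom : Nat → List (Nat × Nat) → Nat
  | pos, [] => pos
  | _, (_, e) :: rest => pvEndFrom e rest

def pvOk : Nat → List (Nat × Nat) → Prop
  | _, [] => True
  | pos, (a, e) :: rest => pos ≤ a ∧ a < e ∧ pvOk e rest

def pvMid (s P S : List Char) : Nat → Nat → List (Nat × Nat) → List Char
  | _, _, [] => []
  | pos, o, (a, e) :: rest =>
      (s.drop pos).take (a - pos) ++ pvPh P S (o + rest.length) ++ pvMid s P S e o rest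

def pvDct (s P S : List Char) : Nat → List (Nat × Nat) → List (String × String)
  | _, [] => []
  | o, (a, e) :: rest =>
      pvDct s P S o rest ++
        [(String.ofList (pvPh P S (o + rest.length)), String.ofList ((s.drop a).take (e - a)))]

def pvPieces (cs P S : List Char) : Nat → List (Nat × Nat) → List (List Char)
  | _, [] => []
  | p, (a, e) :: rest => (cs.drop p).take (a - p) :: pvPh P S rest.length :: pvPieces cs P S e rest

def pvFwd (cs P S : List Char) : List (Nat × Nat) → List (String × String)
  | [] => []
  | (a, e) :: rest =>
      (String.ofList (pvPh P S rest.length), String.ofList ((cs.drop a).take (e - a))) :: pvFwd cs P S rest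

def pvNum : List (Nat × Nat) → List ((Nat × Nat) × Nat)
  | [] => []
  | x :: rest => (x, rest.length) :: pvNum rest

-- placeholders with different numbers are different strings
theorem pvPh_inj (P S : List Char) {m n : Nat}
    (h : String.ofList (pvPh P S m) = String.ofList (pvPh P S n)) : m = n := by
  have h1 := pvOfList_inj h
  unfold pvPh at h1
  rw [List.append_assoc, List.append_assoc] at h1
  have h2 := List.append_cancel_left h1
  have h3 := List.append_cancel_right h2
  exact pvToChars_nat_inj h3

theorem pvPairs_length : (nu : List Nat) → (pvPairs nu).length = nu.length / 2
  | [] => rfl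
  | [a] => by simp [pvPairs]
  | a :: b :: t => by
    have := pvPairs_length t
    simp only [pvPairs, List.length_cons, this]
    omega

theorem pvPairs_getElem : (nu : List Nat) → (i : Nat) → 2 * i + 1 < nu.length →
    (pvPairs nu)[i]! = (nu[2 * i]!, nu[2 * i + 1]! + 1)
  | a :: b :: t, 0, _ => by
    have h1 : pvPairs (a :: b :: t) = (a, b + 1) :: pvPairs t := rfl
    have h2 : ((a :: b :: t : List Nat))[2 * 0]! = a := pvGetbang_cons_zero a _
    have h3 : ((a :: b :: t : List Nat))[2 * 0 + 1]! = b := by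
      rw [show 2 * 0 + 1 = 0 + 1 by rfl, pvGetbang_cons_succ a _ 0 (by simp),
        pvGetbang_cons_zero]
    rw [h1, pvGetbang_cons_zero, h2, h3]
  | a :: b :: t, i + 1, h => by
    have hlen : 2 * i + 1 < t.length := by simp at h; omega
    have ht := pvPairs_getElem t i hlen
    have hpl : i < (pvPairs t).length := by rw [pvPairs_length]; omega
    have h1 : pvPairs (a :: b :: t) = (a, b + 1) :: pvPairs t := rfl
    have h2 : (2 : Nat) * (i + 1) = (2 * i + 1) + 1 := by omega
    have h3 : (2 : Nat) * (i + 1) + 1 = (2 * i + 1 + 1) + 1 := by omega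
    rw [h1, pvGetbang_cons_succ _ _ i hpl, ht, h2,
      pvGetbang_cons_succ a _ (2 * i + 1) (by simp; omega),
      pvGetbang_cons_succ b t (2 * i) (by omega),
      pvGetbang_cons_succ a _ (2 * i + 1 + 1) (by simp; omega),
      pvGetbang_cons_succ b t (2 * i + 1) (by omega)]

theorem pvPairs_ok (nu : List Nat) (M : Nat) (pos : Nat)
    (hp : nu.Pairwise (· < ·)) (hM : ∀ k ∈ nu, k < M) (hpos : ∀ k ∈ nu, pos ≤ k)
    (hposM : pos ≤ M) :
    pvOk pos (pvPairs nu) ∧ pvEndFrom pos (pvPairs nu) ≤ M := by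
  match nu, hp with
  | [], _ => exact ⟨trivial, hposM⟩
  | [a], _ => exact ⟨trivial, hposM⟩
  | a :: b :: t, hp =>
    have hab : a < b := (List.pairwise_cons.mp hp).1 b (by simp)
    have hbt : ∀ k ∈ t, b < k :=
      fun k hk => (List.pairwise_cons.mp (List.pairwise_cons.mp hp).2).1 k hk
    have ht : t.Pairwise (· < ·) :=
      (List.pairwise_cons.mp (List.pairwise_cons.mp hp).2).2
    have hrec := pvPairs_ok t M (b + 1) ht
      (fun k hk => hM k (by simp [hk]))
      (fun k hk => hbt k hk)
      (by have := hM b (by simp); omega)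
    refine ⟨⟨hpos a (by simp), by omega, hrec.1⟩, ?_⟩
    simpa [pvEndFrom] using hrec.2

theorem pvOk_snoc : (ps : List (Nat × Nat)) → (a e pos : Nat) → pvOk pos (ps ++ [(a, e)]) →
    pvOk pos ps ∧ pvEndFrom pos ps ≤ a ∧ a < e
  | [], a, e, pos, h => ⟨trivial, h.1, h.2.1⟩
  | (a1, e1) :: ps', a, e, pos, h => by
    obtain ⟨h1, h2, h3⟩ := h
    have := pvOk_snoc ps' a e e1 h3
    exact ⟨⟨h1, h2, this.1⟩, this.2.1, this.2.2⟩

theorem pvEndFrom_ge : (ps : List (Nat × Nat)) → (pos : Nat) → pvOk pos ps →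
    pos ≤ pvEndFrom pos ps
  | [], _, _ => Nat.le_refl _
  | (a, e) :: rest, pos, h => by
    obtain ⟨h1, h2, h3⟩ := h
    have := pvEndFrom_ge rest e h3
    simp only [pvEndFrom]
    omega

theorem pvEndFrom_snoc : (ps : List (Nat × Nat)) → (a e pos : Nat) →
    pvEndFrom pos (ps ++ [(a, e)]) = e
  | [], _, _, _ => rfl
  | (a1, e1) :: ps', a, e, pos => pvEndFrom_snoc ps' a e e1

theorem pvMid_snoc (s P S : List Char) (ps : List (Nat × Nat)) (a e pos o : Nat) :
    pvMid s P S pos o (ps ++ [(a, e)]) =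
      pvMid s P S pos (o + 1) ps ++
        ((s.drop (pvEndFrom pos ps)).take (a - pvEndFrom pos ps) ++ pvPh P S o) := by
  induction ps generalizing pos o with
  | nil => simp [pvMid, pvEndFrom]
  | cons x ps' ih =>
    obtain ⟨a1, e1⟩ := x
    simp only [List.cons_append, pvMid, pvEndFrom, List.length_append, List.length_cons,
      List.length_nil, ih e1 o, List.append_assoc]
    rw [show o + (ps'.length + (0 + 1)) = o + 1 + ps'.length by omega]

theorem pvDct_snoc (s P S : List Char) (ps : List (Nat × Nat)) (a e o : Nat) :
    pvDct s P S o (ps ++ [(a, e)]) =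
      (String.ofList (pvPh P S o), String.ofList ((s.drop a).take (e - a))) :: pvDct s P S (o + 1) ps := by
  induction ps generalizing o with
  | nil => simp [pvDct]
  | cons x ps' ih =>
    obtain ⟨a1, e1⟩ := x
    simp only [List.cons_append, pvDct, List.length_append, List.length_cons,
      List.length_nil, ih o, List.append_assoc]
    rw [show o + (ps'.length + (0 + 1)) = o + 1 + ps'.length by omega]

theorem pvMid_congr (s t P S : List Char) (ps : List (Nat × Nat)) (pos o m : Nat)
    (hok : pvOk pos ps) (hm : pvEndFrom pos ps ≤ m) (hst : s.take m = t.take m) :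
    pvMid s P S pos o ps = pvMid t P S pos o ps := by
  induction ps generalizing pos o with
  | nil => rfl
  | cons x ps' ih =>
    obtain ⟨a, e⟩ := x
    obtain ⟨h1, h2, h3⟩ := hok
    have hee : e ≤ pvEndFrom e ps' := pvEndFrom_ge ps' e h3
    have hem : pvEndFrom e ps' ≤ m := by simpa [pvEndFrom] using hm
    have ham : a ≤ m := by omega
    have hta : s.take a = t.take a := by
      have h4 : List.take a (List.take m s) = List.take a (List.take m t) := by rw [hst]
      simpa [List.take_take, Nat.min_eq_left ham] using h4
    have hseg : (s.drop pos).take (a - pos) = (t.drop pos).take (a - pos) := by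
      rw [← List.drop_take, ← List.drop_take, hta]
    simp only [pvMid, hseg, ih e o h3 hem]

theorem pvDct_congr (s t P S : List Char) (ps : List (Nat × Nat)) (pos o m : Nat)
    (hok : pvOk pos ps) (hm : pvEndFrom pos ps ≤ m) (hst : s.take m = t.take m) :
    pvDct s P S o ps = pvDct t P S o ps := by
  induction ps generalizing pos o with
  | nil => rfl
  | cons x ps' ih =>
    obtain ⟨a, e⟩ := x
    obtain ⟨h1, h2, h3⟩ := hok
    have hee : e ≤ pvEndFrom e ps' := pvEndFrom_ge ps' e h3
    have hem : pvEndFrom e ps' ≤ m := by simpa [pvEndFrom] using hm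
    have hte : s.take e = t.take e := by
      have h4 : List.take e (List.take m s) = List.take e (List.take m t) := by rw [hst]
      simpa [List.take_take, Nat.min_eq_left (show e ≤ m by omega)] using h4
    have hseg : (s.drop a).take (e - a) = (t.drop a).take (e - a) := by
      rw [← List.drop_take, ← List.drop_take, hte]
    simp only [pvDct, hseg, ih e o h3 hem]

theorem pvDct_keys (s P S : List Char) (ps : List (Nat × Nat)) (o : Nat) :
    (pvDct s P S o ps).map Prod.fst =
      (List.range ps.length).map (fun j => String.ofList (pvPh P S (o + j))) := by
  induction ps generalizing o with
  | nil => rfl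
  | cons x ps' ih =>
    obtain ⟨a, e⟩ := x
    simp only [pvDct, List.map_append, ih o, List.length_cons, List.range_succ,
      List.map_map]
    simp

theorem pvDct_keys_nodup (s P S : List Char) (ps : List (Nat × Nat)) (o : Nat) :
    ((pvDct s P S o ps).map Prod.fst).Nodup := by
  rw [pvDct_keys]
  apply List.Nodup.map _ List.nodup_range
  intro i j hij
  have := pvPh_inj P S hij
  omega

-- A's reversed splice loop, characterised over the pair list
theorem pvA_loop (P S : List Char) (ps : List (Nat × Nat)) :
    ∀ (s : List Char) (d : PySem.Dict String String) (pos : Nat),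
    pvOk pos ps → pvEndFrom pos ps ≤ s.length →
    (∀ j, d.items.length ≤ j → d.contains (String.ofList (pvPh P S j)) = false) →
    ps.reverse.foldl
      (fun (st : List Char × PySem.Dict String String) (pr : Nat × Nat) =>
        (st.1.take pr.1 ++ pvPh P S st.2.items.length ++ st.1.drop pr.2,
         st.2.insert (String.ofList (pvPh P S st.2.items.length))
           (String.ofList ((st.1.drop pr.1).take (pr.2 - pr.1))))) (s, d)
    = (s.take pos ++ pvMid s P S pos d.items.length ps ++ s.drop (pvEndFrom pos ps),
       PySem.Dict.mk (d.items ++ pvDct s P S d.items.length ps)) := by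
  induction ps using List.reverseRecOn with
  | nil =>
    intro s d pos hok hlen hfresh
    obtain ⟨di⟩ := d
    simp [pvMid, pvDct, pvEndFrom, List.take_append_drop]
  | append_singleton ps' pr ih =>
    obtain ⟨a, e⟩ := pr
    intro s d pos hok hlen hfresh
    obtain ⟨hok', hEa, hae⟩ := pvOk_snoc ps' a e pos hok
    rw [pvEndFrom_snoc] at hlen
    have hposE : pos ≤ pvEndFrom pos ps' := pvEndFrom_ge ps' pos hok'
    have has : a ≤ s.length := by omega
    rw [List.reverse_append]
    simp only [List.reverse_cons, List.reverse_nil, List.nil_append,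
      List.singleton_append, List.foldl_cons]
    have hfro : d.contains (String.ofList (pvPh P S d.items.length)) = false :=
      hfresh d.items.length (le_refl _)
    have hitems := PySem.Dict.items_insert_of_not_contains d
      (String.ofList ((s.drop a).take (e - a))) hfro
    have hfresh1 : ∀ j,
        (d.insert (String.ofList (pvPh P S d.items.length))
          (String.ofList ((s.drop a).take (e - a)))).items.length ≤ j →
        (d.insert (String.ofList (pvPh P S d.items.length))
          (String.ofList ((s.drop a).take (e - a)))).contains
            (String.ofList (pvPh P S j)) = false := by
      intro j hj
      rw [hitems, List.length_append, List.length_cons, List.length_nil] at hj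
      rw [PySem.Dict.contains_insert]
      have hne : (String.ofList (pvPh P S j) == String.ofList (pvPh P S d.items.length)) = false := by
        simp only [beq_eq_false_iff_ne, ne_eq]
        intro hcontra
        have := pvPh_inj P S hcontra
        omega
      rw [hne, Bool.false_or]
      exact hfresh j (by omega)
    have hlen1 : pvEndFrom pos ps' ≤
        (s.take a ++ pvPh P S d.items.length ++ s.drop e).length := by
      simp only [List.length_append, List.length_take]
      omega
    have hrec := ih (s.take a ++ pvPh P S d.items.length ++ s.drop e)
      (d.insert (String.ofList (pvPh P S d.items.length))
        (String.ofList ((s.drop a).take (e - a)))) pos hok' hlen1 hfresh1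
    rw [hrec]
    have hd1len : (d.insert (String.ofList (pvPh P S d.items.length))
        (String.ofList ((s.drop a).take (e - a)))).items.length = d.items.length + 1 := by
      rw [hitems]; simp
    have htka : (s.take a ++ pvPh P S d.items.length ++ s.drop e).take a = s.take a := by
      rw [List.append_assoc, List.take_append_of_le_length (by simp; omega)]
      simp [List.take_take]
    have htkpos : (s.take a ++ pvPh P S d.items.length ++ s.drop e).take pos = s.take pos := by
      have h1 : (s.take a ++ pvPh P S d.items.length ++ s.drop e).take pos
          = ((s.take a ++ pvPh P S d.items.length ++ s.drop e).take a).take pos := by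
        rw [List.take_take, Nat.min_eq_left (by omega)]
      rw [h1, htka, List.take_take, Nat.min_eq_left (by omega)]
    have hmid := pvMid_congr (s.take a ++ pvPh P S d.items.length ++ s.drop e) s P S ps'
      pos (d.items.length + 1) a hok' hEa htka
    have hdct := pvDct_congr (s.take a ++ pvPh P S d.items.length ++ s.drop e) s P S ps'
      pos (d.items.length + 1) a hok' hEa htka
    have hdrop : (s.take a ++ pvPh P S d.items.length ++ s.drop e).drop (pvEndFrom pos ps')
        = (s.drop (pvEndFrom pos ps')).take (a - pvEndFrom pos ps')
            ++ pvPh P S d.items.length ++ s.drop e := by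
      rw [List.append_assoc, List.drop_append_of_le_length (by simp; omega),
        List.drop_take, ← List.append_assoc]
    rw [hd1len, hmid, hdct, hdrop, htkpos, hitems, pvEndFrom_snoc, pvMid_snoc, pvDct_snoc]
    simp [List.append_assoc]

-- B's forward piece loop, characterised over the pair list
theorem pvB_main (cs P S : List Char) (ps : List (Nat × Nat)) :
    ∀ (pcs : List (List Char)) (prs : List (String × String)) (p : Nat),
    (pvNum ps).foldl
      (fun (acc : List (List Char) × List (String × String) × Int) (pr : (Nat × Nat) × Nat) =>
        (acc.1 ++ [PySem.List.slice cs (some acc.2.2) (some (pr.1.1 : Int)), pvPh P S pr.2],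
         acc.2.1 ++ [(String.ofList (pvPh P S pr.2),
            String.ofList (PySem.List.slice cs (some (pr.1.1 : Int)) (some (pr.1.2 : Int))))],
         (pr.1.2 : Int))) (pcs, prs, (p : Int))
    = (pcs ++ pvPieces cs P S p ps, prs ++ pvFwd cs P S ps, (pvEndFrom p ps : Int)) := by
  induction ps with
  | nil => intro pcs prs p; simp [pvNum, pvPieces, pvFwd, pvEndFrom]
  | cons x ps' ih =>
    obtain ⟨a, e⟩ := x
    intro pcs prs p
    simp only [pvNum, List.foldl_cons]
    rw [ih]
    have hs1 : PySem.List.slice cs (some (p : Int)) (some (a : Int)) = (cs.drop p).take (a - p) := by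
      rw [PySem.List.slice_toNat cs (by positivity) (by positivity)]
      simp
    have hs2 : PySem.List.slice cs (some (a : Int)) (some (e : Int)) = (cs.drop a).take (e - a) := by
      rw [PySem.List.slice_toNat cs (by positivity) (by positivity)]
      simp
    simp [pvPieces, pvFwd, pvEndFrom, List.append_assoc, hs1, hs2]

theorem pvNum_eq : (ps : List (Nat × Nat)) →
    (List.range ps.length).map (fun k => (ps[k]!, ps.length - 1 - k)) = pvNum ps
  | [] => rfl
  | x :: rest => by
    simp only [List.length_cons, List.range_succ_eq_map, List.map_cons, List.map_map]
    have h0 : (x :: rest)[0]! = x := pvGetbang_cons_zero x rest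
    have htail : (List.range rest.length).map
        ((fun k => ((x :: rest)[k]!, rest.length + 1 - 1 - k)) ∘ Nat.succ)
        = (List.range rest.length).map (fun k => (rest[k]!, rest.length - 1 - k)) := by
      apply List.map_congr_left
      intro k hk
      simp only [List.mem_range] at hk
      simp only [Function.comp, Nat.succ_eq_add_one]
      rw [pvGetbang_cons_succ x rest k hk]
      congr 1
      omega
    rw [htail, pvNum_eq rest]
    simp [pvNum, h0]

theorem pvPieces_flatten (cs P S : List Char) (ps : List (Nat × Nat)) (p : Nat) :
    (pvPieces cs P S p ps).flatten = pvMid cs P S p 0 ps := by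
  induction ps generalizing p with
  | nil => rfl
  | cons x ps' ih =>
    obtain ⟨a, e⟩ := x
    simp [pvPieces, pvMid, ih]

theorem pvFwd_reverse (cs P S : List Char) (ps : List (Nat × Nat)) :
    (pvFwd cs P S ps).reverse = pvDct cs P S 0 ps := by
  induction ps with
  | nil => rfl
  | cons x ps' ih =>
    obtain ⟨a, e⟩ := x
    simp [pvFwd, pvDct, ih]

theorem pvGetD_map_cast (nu : List Nat) (m : Nat) (hm : m < nu.length) :
    PySem.List.pyGetD (nu.map (fun (k : Nat) => (k : Int))) ((m : Nat) : Int) 0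
      = ((nu[m]! : Nat) : Int) := by
  rw [PySem.List.pyGetD_natCast, List.getD_eq_getElem _ _ (by simpa using hm)]
  rw [List.getElem_map]
  rw [getElem!_pos nu m hm]

theorem pvA_fold_conv (nu : List Nat) (cs P S : List Char) (heven : 2 ∣ nu.length) :
    (List.range (nu.length / 2)).reverse.foldl
      (fun (st : List Char × PySem.Dict String String) i =>
        (PySem.List.slice st.1 (some 0)
              (some (PySem.List.pyGetD (nu.map (fun (k : Nat) => (k : Int))) ((i * 2 : Nat) : Int) 0))
            ++ (P ++ PySem.Int.toChars (st.2.items.length : Int) ++ S)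
            ++ PySem.List.slice st.1
              (some (PySem.List.pyGetD (nu.map (fun (k : Nat) => (k : Int))) ((i * 2 + 1 : Nat) : Int) 0 + 1)) none,
         st.2.insert (String.ofList (P ++ PySem.Int.toChars (st.2.items.length : Int) ++ S))
           (String.ofList (PySem.List.slice st.1
              (some (PySem.List.pyGetD (nu.map (fun (k : Nat) => (k : Int))) ((i * 2 : Nat) : Int) 0))
              (some (PySem.List.pyGetD (nu.map (fun (k : Nat) => (k : Int))) ((i * 2 + 1 : Nat) : Int) 0 + 1))))))
      (cs, PySem.Dict.mk [])
    = (pvPairs nu).reverse.foldl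
      (fun (st : List Char × PySem.Dict String String) (pr : Nat × Nat) =>
        (st.1.take pr.1 ++ pvPh P S st.2.items.length ++ st.1.drop pr.2,
         st.2.insert (String.ofList (pvPh P S st.2.items.length))
           (String.ofList ((st.1.drop pr.1).take (pr.2 - pr.1)))))
      (cs, PySem.Dict.mk []) := by
  have hps := pvPairs_length nu
  have h1 : (pvPairs nu).reverse
      = ((List.range (pvPairs nu).length).map (fun i => (pvPairs nu)[i]!)).reverse := by
    rw [pvMap_getbang_range]
  rw [h1, ← List.map_reverse, List.foldl_map, hps]
  apply PySem.List.foldl_congr_mem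
  intro acc i hi
  have hi' : i < nu.length / 2 := by
    rw [List.mem_reverse, List.mem_range] at hi
    exact hi
  have hb2 : 2 * i + 1 < nu.length := by omega
  have hgp := pvPairs_getElem nu i hb2
  have hmul : i * 2 = 2 * i := Nat.mul_comm i 2
  have hA1 := pvGetD_map_cast nu (2 * i) (by omega)
  have hA2 := pvGetD_map_cast nu (2 * i + 1) (by omega)
  have hcast : ((nu[2 * i + 1]! : Nat) : Int) + 1 = ((nu[2 * i + 1]! + 1 : Nat) : Int) := by
    push_cast
    ring
  have hs1 : PySem.List.slice acc.1 (some 0) (some ((nu[2 * i]! : Nat) : Int))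
      = acc.1.take nu[2 * i]! := by
    rw [PySem.List.slice_zero_start, PySem.List.slice_to _ (by positivity)]
    simp
  have hs2 : PySem.List.slice acc.1 (some (((nu[2 * i + 1]! + 1 : Nat)) : Int)) none
      = acc.1.drop (nu[2 * i + 1]! + 1) := by
    rw [PySem.List.slice_from _ (by positivity)]
    simp
  have hs3 : PySem.List.slice acc.1 (some ((nu[2 * i]! : Nat) : Int))
        (some (((nu[2 * i + 1]! + 1 : Nat)) : Int))
      = (acc.1.drop nu[2 * i]!).take (nu[2 * i + 1]! + 1 - nu[2 * i]!) := by
    rw [PySem.List.slice_toNat _ (by positivity) (by positivity)]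
    simp
  rw [hmul, hA1, hA2, hcast, hs1, hs2, hs3, hgp]
  simp [pvPh]

theorem pvB_fold_conv (nu : List Nat) (cs P S : List Char) (heven : 2 ∣ nu.length) :
    (List.range (nu.length / 2)).foldl
      (fun (acc : List (List Char) × List (String × String) × Int) k =>
        (acc.1 ++ [PySem.List.slice cs (some acc.2.2)
              (some (PySem.List.pyGetD (nu.map (fun (k : Nat) => (k : Int))) ((2 * k : Nat) : Int) 0)),
            P ++ PySem.Int.toChars (((nu.length / 2 : Nat) : Int) - 1 - k) ++ S],
         acc.2.1 ++ [(String.ofList (P ++ PySem.Int.toChars (((nu.length / 2 : Nat) : Int) - 1 - k) ++ S),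
            String.ofList (PySem.List.slice cs
              (some (PySem.List.pyGetD (nu.map (fun (k : Nat) => (k : Int))) ((2 * k : Nat) : Int) 0))
              (some (PySem.List.pyGetD (nu.map (fun (k : Nat) => (k : Int))) ((2 * k + 1 : Nat) : Int) 0 + 1))))],
         PySem.List.pyGetD (nu.map (fun (k : Nat) => (k : Int))) ((2 * k + 1 : Nat) : Int) 0 + 1))
      ([], [], 0)
    = (pvNum (pvPairs nu)).foldl
      (fun (acc : List (List Char) × List (String × String) × Int) (pr : (Nat × Nat) × Nat) =>
        (acc.1 ++ [PySem.List.slice cs (some acc.2.2) (some (pr.1.1 : Int)), pvPh P S pr.2],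
         acc.2.1 ++ [(String.ofList (pvPh P S pr.2),
            String.ofList (PySem.List.slice cs (some (pr.1.1 : Int)) (some (pr.1.2 : Int))))],
         (pr.1.2 : Int)))
      ([], [], 0) := by
  have hps := pvPairs_length nu
  have h1 : pvNum (pvPairs nu)
      = (List.range (pvPairs nu).length).map
          (fun k => ((pvPairs nu)[k]!, (pvPairs nu).length - 1 - k)) :=
    (pvNum_eq (pvPairs nu)).symm
  rw [h1, List.foldl_map, hps]
  apply PySem.List.foldl_congr_mem
  intro acc k hk
  have hk' : k < nu.length / 2 := List.mem_range.mp hk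
  have hb2 : 2 * k + 1 < nu.length := by omega
  have hgp := pvPairs_getElem nu k hb2
  have hA1 := pvGetD_map_cast nu (2 * k) (by omega)
  have hA2 := pvGetD_map_cast nu (2 * k + 1) (by omega)
  have hcast : ((nu[2 * k + 1]! : Nat) : Int) + 1 = ((nu[2 * k + 1]! + 1 : Nat) : Int) := by
    push_cast
    ring
  have hnum : (((nu.length / 2 : Nat) : Int) - 1 - (k : Int))
      = ((nu.length / 2 - 1 - k : Nat) : Int) := by
    omega
  rw [hgp, hA1, hA2, hcast, hnum]
  simp [pvPh]

-- the assembled main proof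
theorem pvMain (strung quote1 quote2 escape_char sub_prefix sub_suffix : String)
    (h0 : pvDelim0 strung.toList quote1 quote2 = false)
    (heven : 2 ∣ (pvSpecIdxs strung.toList quote1 quote2 escape_char).length) :
    substituteBetween2 strung quote1 quote2 escape_char sub_prefix sub_suffix
      = substituteBetween2_alt strung quote1 quote2 escape_char sub_prefix sub_suffix := by
  unfold substituteBetween2 substituteBetween2_alt
  simp only [pvA_idxs, pvB_loop, h0, Bool.false_eq_true, if_false]
  by_cases hemp : pvAllIdxs strung.toList quote1 quote2 = []
  · have hs : pvSpecIdxs strung.toList quote1 quote2 escape_char = [] := by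
      rw [pvSpec_sub_all, hemp]; rfl
    simp [hemp, hs, PySem.List.slice_from (a := (0 : Int)) _ (by omega), String.ofList_toList]
  · have hlenpos : 0 < ((pvAllIdxs strung.toList quote1 quote2).map (fun (k : Nat) => (k : Int))).length := by
      simp only [List.length_map]
      rcases Nat.eq_zero_or_pos (pvAllIdxs strung.toList quote1 quote2).length with h | h
      · exact absurd (List.length_eq_zero_iff.mp h) hemp
      · exact h
    rw [if_pos hlenpos]
    simp only [pvAllIdxs_contains_zero, h0, Bool.false_eq_true, if_false]
    simp only [pvA_escaped strung.toList quote1 quote2 escape_char h0]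
    have hm2 : (pvSpecIdxs strung.toList quote1 quote2 escape_char).length % 2 = 0 := by omega
    simp only [List.length_map, hm2]
    have hnupair : (pvSpecIdxs strung.toList quote1 quote2 escape_char).Pairwise (· < ·) :=
      List.Pairwise.sublist List.filter_sublist List.pairwise_lt_range
    have hbnd : ∀ k ∈ pvSpecIdxs strung.toList quote1 quote2 escape_char,
        k < strung.toList.length := by
      intro k hk
      exact List.mem_range.mp (List.mem_filter.mp hk).1
    have hok := pvPairs_ok (pvSpecIdxs strung.toList quote1 quote2 escape_char)
      strung.toList.length 0 hnupair hbnd (fun _ _ => Nat.zero_le _) (Nat.zero_le _)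
    have hfresh0 : ∀ j, (PySem.Dict.mk ([] : List (String × String))).items.length ≤ j →
        (PySem.Dict.mk ([] : List (String × String))).contains
          (String.ofList (pvPh sub_prefix.toList sub_suffix.toList j)) = false := by
      intro j _
      simp [PySem.Dict.contains_mk]
    rw [pvA_fold_conv (pvSpecIdxs strung.toList quote1 quote2 escape_char) strung.toList
        sub_prefix.toList sub_suffix.toList heven,
      pvA_loop sub_prefix.toList sub_suffix.toList
        (pvPairs (pvSpecIdxs strung.toList quote1 quote2 escape_char)) strung.toList
        (PySem.Dict.mk []) 0 hok.1 hok.2 hfresh0,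
      pvB_fold_conv (pvSpecIdxs strung.toList quote1 quote2 escape_char) strung.toList
        sub_prefix.toList sub_suffix.toList heven]
    have hBm := pvB_main strung.toList sub_prefix.toList sub_suffix.toList
      (pvPairs (pvSpecIdxs strung.toList quote1 quote2 escape_char)) [] [] 0
    simp only [Nat.cast_zero] at hBm
    rw [hBm]
    have hE := hok.2
    have hdrop : PySem.List.slice strung.toList
        (some ((pvEndFrom 0 (pvPairs (pvSpecIdxs strung.toList quote1 quote2 escape_char)) : Nat) : Int)) none
        = strung.toList.drop (pvEndFrom 0 (pvPairs (pvSpecIdxs strung.toList quote1 quote2 escape_char))) := by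
      rw [PySem.List.slice_from _ (by positivity)]
      simp
    have hitems := PySem.Dict.items_foldl_insert_fresh
      (pvDct strung.toList sub_prefix.toList sub_suffix.toList 0
        (pvPairs (pvSpecIdxs strung.toList quote1 quote2 escape_char)))
      Prod.fst Prod.snd (PySem.Dict.mk [])
      (fun a _ => by simp [PySem.Dict.contains_mk])
      (pvDct_keys_nodup strung.toList sub_prefix.toList sub_suffix.toList _ 0)
    simp only [List.nil_append, List.flatten_append, pvPieces_flatten, hdrop]
    rw [pvFwd_reverse, hitems]
    simp [pvPh]
  
-- ===== VERDICT (by name: the statement is the Claim_ definition above) =====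
theorem substituteBetween2_spec : Claim_equal_substituteBetween2 := by
  intro strung quote1 quote2 escape_char sub_prefix sub_suffix hDom hPre
  unfold Spec_substituteBetween2
  exact (pvMain strung quote1 quote2 escape_char sub_prefix sub_suffix hPre.1 hPre.2)
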